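-- pv_equiv track=rewrite | github.com/zqzqz/IS_course_mini_tools | RSA.py | str_to_num
-- ===== SOURCE A (Python) =====
-- def str_to_num(str):
--     asc=[]
--     for i in range(len(str)):
--         asc.append(ord(str[i]))
--     for j in range(4-len(str)%4):
--         asc.append(0)
--     flag = 0
--     result = []
--     while flag < len(str):
--         tmp = 0
--         for f in range(4):
--             t = asc.pop(0)
--             tmp = tmp*16*16 + t
--         result.append(tmp)
--         flag += 4
--     return result
-- ===== SOURCE B (Python) =====
-- def str_to_num(str):
--     result = []
--     for i in range(0, len(str), 4):
--         chunk = str[i:i+4]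
--         tmp = 0
--         for k in range(4):
--             tmp = tmp * 256 + (ord(chunk[k]) if k < len(chunk) else 0)
--         result.append(tmp)
--     return result
-- ===== Notes on version B (the rewrite author's own statement) =====
-- stated objective: simpler
-- what changed: B processes the string in one chunked pass over 4-character slices, folding each chunk into a packed number directly, instead of A's build-then-drain of a padded ASCII list consumed with pop(0).
import Mathlib
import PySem

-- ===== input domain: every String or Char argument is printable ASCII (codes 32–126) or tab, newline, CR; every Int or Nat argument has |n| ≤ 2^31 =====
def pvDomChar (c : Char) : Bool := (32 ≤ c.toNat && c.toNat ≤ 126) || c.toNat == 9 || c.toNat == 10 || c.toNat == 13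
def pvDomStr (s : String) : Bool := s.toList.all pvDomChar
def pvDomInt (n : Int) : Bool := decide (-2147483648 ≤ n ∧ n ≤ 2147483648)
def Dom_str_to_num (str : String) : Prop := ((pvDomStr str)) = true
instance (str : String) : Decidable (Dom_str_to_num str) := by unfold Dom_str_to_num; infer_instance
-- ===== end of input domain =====

-- B replaces A's padded ASCII queue drained with pop(0) by a single chunked pass over 4-char slices.

-- ===== PORT A =====
-- asc.pop(0); the list is never empty when this runs in A (padding guarantees it), so the [] case is unreachable
def pvPop0 : List Int → Int × List Int
  | [] => (0, [])
  | t :: a => (t, a)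

-- the while loop: while flag < n, pop 4 values folding tmp = tmp*16*16 + t, append tmp, flag += 4
def pvALoop (asc : List Int) (flag n : Nat) : List Int :=
  if flag < n then
    let st := (List.range 4).foldl
      (fun (p : Int × List Int) _ => let q := pvPop0 p.2; (p.1 * 16 * 16 + q.1, q.2)) (0, asc)
    st.1 :: pvALoop st.2 (flag + 4) n
  else []
  termination_by n - flag

def str_to_num (str : String) : List Int :=
  let cs := str.toList
  let asc := cs.map (fun c => (c.toNat : Int))            -- ord(str[i]) appended for each i
  let asc := asc ++ List.replicate (4 - cs.length % 4) 0  -- zero padding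
  pvALoop asc 0 cs.length

-- ===== PORT B =====
-- tmp = tmp*256 + (ord(chunk[k]) if k < len(chunk) else 0), k in range(4)
def pvBNum (chunk : List Char) : Int :=
  (List.range 4).foldl
    (fun tmp k => tmp * 256 + (match chunk[k]? with | some c => (c.toNat : Int) | none => 0)) 0

-- for i in range(0, len(str), 4): chunk = str[i:i+4]
def pvBChunks : List Char → List Int
  | [] => []
  | c :: rest => pvBNum (List.take 4 (c :: rest)) :: pvBChunks (List.drop 3 rest)
  termination_by cs => cs.length
  decreasing_by simp [List.length_drop]

def str_to_num_alt (str : String) : List Int := pvBChunks str.toList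

-- ===== PRECONDITION & SPEC =====
def Spec_str_to_num (str : String) (out : List Int) : Prop := out = str_to_num_alt str
instance (str : String) (out : List Int) : Decidable (Spec_str_to_num str out) := by unfold Spec_str_to_num; infer_instance

-- ===== CLAIM (what is proved, stated in full; the proofs are below) =====
def Claim_equal_str_to_num : Prop := ∀ (str : String), Dom_str_to_num str → Spec_str_to_num str (str_to_num str)

-- ===== LEMMAS AND PROOFS =====

theorem pvKey (rest : List Char) (flag : Nat) (h4 : flag % 4 = 0) :
    pvALoop (rest.map (fun c => (c.toNat : Int)) ++ List.replicate (4 - (flag + rest.length) % 4) 0)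
      flag (flag + rest.length) = pvBChunks rest := by
  induction rest using pvBChunks.induct generalizing flag with
  | case1 => rw [pvALoop]; simp [pvBChunks]
  | case2 a rest ih =>
    rcases rest with _ | ⟨b, (_ | ⟨c, (_ | ⟨d, rest'⟩)⟩)⟩
    · have hp : 4 - (flag + 1) % 4 = 3 := by omega
      rw [pvALoop]
      simp [hp, pvBChunks, pvBNum, pvPop0, List.range_succ]
      rw [pvALoop]
      simp
      ring
    · have hp : 4 - (flag + 2) % 4 = 2 := by omega
      rw [pvALoop]
      simp [hp, pvBChunks, pvBNum, pvPop0, List.range_succ]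
      rw [pvALoop]
      simp
      ring
    · have hp : 4 - (flag + 3) % 4 = 1 := by omega
      rw [pvALoop]
      simp [hp, pvBChunks, pvBNum, pvPop0, List.range_succ]
      rw [pvALoop]
      simp
      ring
    · have h4' : (flag + 4) % 4 = 0 := by omega
      have ihx := ih (flag + 4) h4'
      rw [pvALoop]
      have hlen : flag + (a :: b :: c :: d :: rest').length
          = (flag + 4) + rest'.length := by simp; omega
      simp only [List.length_cons] at ihx ⊢
      rw [pvBChunks]
      simp [pvPop0, pvBNum, List.range_succ]
      constructor
      · ring
      · have e : flag + (rest'.length + 1 + 1 + 1 + 1) = flag + 4 + rest'.length := by omega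
        rw [e]
        simpa using ihx

-- ===== VERDICT (by name: the statement is the Claim_ definition above) =====
theorem str_to_num_spec : Claim_equal_str_to_num := by
  intro s _
  unfold Spec_str_to_num str_to_num str_to_num_alt
  have := pvKey s.toList 0 rfl
  simpa using this
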